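-- pv_equiv track=rewrite | github.com/Dheep13/IS-Migration | mermaid_syntax_fixer.py | _fix_main_process_flow
-- ===== SOURCE A (Python) =====
-- def _fix_main_process_flow(content: str) -> str:
--     """Fix the specific main process flow diagram issue"""
--     # Remove the problematic subgraph and its connection
--     lines = content.split('\n')
--     fixed_lines = []
--     in_subgraph = False
--
--     for line in lines:
--         # Skip subgraph definition and its contents
--         if 'subgraph SubProcesses' in line:
--             in_subgraph = True
--             continue
--         elif in_subgraph and line.strip() == 'end':
--             in_subgraph = False
--             continue
--         elif in_subgraph:
--             continue
--         # Skip the problematic connection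
--         elif '-.-> SubProcesses' in line:
--             continue
--         else:
--             fixed_lines.append(line)
--
--     return '\n'.join(fixed_lines)
-- ===== SOURCE B (Python) =====
-- def _fix_main_process_flow(content: str) -> str:
--     """Fix the specific main process flow diagram issue (index-jump rewrite)."""
--     lines = content.split('\n')
--     n = len(lines)
--     out = []
--     i = 0
--     while i < n:
--         line = lines[i]
--         if 'subgraph SubProcesses' in line:
--             # jump past the whole block, including its terminator line
--             i += 1
--             while i < n and lines[i].strip() != 'end':
--                 i += 1
--             i += 1
--         elif '-.-> SubProcesses' in line:
--             i += 1
--         else: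
--             out.append(line)
--             i += 1
--     return '\n'.join(out)
-- ===== Notes on version B (the rewrite author's own statement) =====
-- stated objective: alternative
-- what changed: Replaces the boolean in_subgraph state machine by an index-jump scan: on a subgraph header the cursor jumps forward past the whole block (up to and including its stripped terminator line) in one inner scan, so the output pass carries no mode flag.
import Mathlib
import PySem

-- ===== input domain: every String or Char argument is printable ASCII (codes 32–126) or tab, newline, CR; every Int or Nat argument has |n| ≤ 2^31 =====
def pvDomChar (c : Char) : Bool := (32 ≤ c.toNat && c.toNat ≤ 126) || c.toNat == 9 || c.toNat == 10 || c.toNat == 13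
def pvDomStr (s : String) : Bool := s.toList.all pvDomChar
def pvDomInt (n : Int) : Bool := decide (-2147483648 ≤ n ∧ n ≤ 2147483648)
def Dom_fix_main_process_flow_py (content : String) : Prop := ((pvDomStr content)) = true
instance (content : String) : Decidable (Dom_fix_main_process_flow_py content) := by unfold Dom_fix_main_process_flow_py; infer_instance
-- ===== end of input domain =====

-- B rewrites A's boolean in_subgraph state machine as an index-jump scan that skips a whole block at once; same output.

-- ===== PORT A =====
-- one loop iteration of A: state = (fixed_lines, in_subgraph); lines are List Char
def pvStepA (st : List (List Char) × Bool) (line : List Char) : List (List Char) × Bool :=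
  if PySem.Chars.isIn "subgraph SubProcesses".toList line = true then (st.1, true)
  else if st.2 = true ∧ PySem.Chars.strip line = "end".toList then (st.1, false)
  else if st.2 = true then st
  else if PySem.Chars.isIn "-.-> SubProcesses".toList line = true then st
  else (st.1 ++ [line], st.2)

def fix_main_process_flow_py (content : String) : String :=
  let lines := PySem.Chars.splitOn content.toList "\n".toList
  let final := lines.foldl pvStepA ([], false)
  String.ofList (PySem.Chars.join "\n".toList final.1)

-- ===== PORT B =====
-- B's inner while loop: advance past the block, dropping its terminator line too
def pvSkipToEnd : List (List Char) → List (List Char)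
  | [] => []
  | l :: rest => if PySem.Chars.strip l = "end".toList then rest else pvSkipToEnd rest

theorem pvSkipToEnd_length_le (ls : List (List Char)) : (pvSkipToEnd ls).length ≤ ls.length := by
  induction ls with
  | nil => simp [pvSkipToEnd]
  | cons l rest ih =>
    simp only [pvSkipToEnd]
    split
    · simp
    · exact Nat.le_succ_of_le ih

-- B's outer while loop over the remaining lines
def pvBuild : List (List Char) → List (List Char)
  | [] => []
  | l :: rest =>
    if PySem.Chars.isIn "subgraph SubProcesses".toList l = true then pvBuild (pvSkipToEnd rest)
    else if PySem.Chars.isIn "-.-> SubProcesses".toList l = true then pvBuild rest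
    else l :: pvBuild rest
termination_by ls => ls.length
decreasing_by
  · exact Nat.lt_succ_of_le (pvSkipToEnd_length_le rest)
  · simp
  · simp

def fix_main_process_flow_py_alt (content : String) : String :=
  String.ofList (PySem.Chars.join "\n".toList
    (pvBuild (PySem.Chars.splitOn content.toList "\n".toList)))

-- ===== PRECONDITION & SPEC =====
def Spec_fix_main_process_flow_py (content : String) (out : String) : Prop := out = fix_main_process_flow_py_alt content
instance (content : String) (out : String) : Decidable (Spec_fix_main_process_flow_py content out) := by unfold Spec_fix_main_process_flow_py; infer_instance

-- ===== CLAIM (what is proved, stated in full; the proofs are below) =====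
def Claim_equal_fix_main_process_flow_py : Prop := ∀ (content : String), Dom_fix_main_process_flow_py content → Spec_fix_main_process_flow_py content (fix_main_process_flow_py content)

-- ===== LEMMAS AND PROOFS =====

-- unfolding lemmas for A's step, B's skip and B's build, one per branch
theorem pvStepA_hdr {l : List Char} (st : List (List Char) × Bool)
    (hh : PySem.Chars.isIn "subgraph SubProcesses".toList l = true) :
    pvStepA st l = (st.1, true) := by unfold pvStepA; rw [if_pos hh]

theorem pvStepA_skip_end {l : List Char} (acc : List (List Char))
    (hh : ¬ PySem.Chars.isIn "subgraph SubProcesses".toList l = true)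
    (he : PySem.Chars.strip l = "end".toList) :
    pvStepA (acc, true) l = (acc, false) := by
  unfold pvStepA; rw [if_neg hh, if_pos (⟨rfl, he⟩ : _ ∧ _)]

theorem pvStepA_skip {l : List Char} (acc : List (List Char))
    (hh : ¬ PySem.Chars.isIn "subgraph SubProcesses".toList l = true)
    (he : ¬ PySem.Chars.strip l = "end".toList) :
    pvStepA (acc, true) l = (acc, true) := by
  unfold pvStepA; rw [if_neg hh, if_neg (fun hcond : _ ∧ _ => he hcond.2), if_pos rfl]

theorem pvStepA_conn {l : List Char} (acc : List (List Char))
    (hh : ¬ PySem.Chars.isIn "subgraph SubProcesses".toList l = true)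
    (hc : PySem.Chars.isIn "-.-> SubProcesses".toList l = true) :
    pvStepA (acc, false) l = (acc, false) := by
  unfold pvStepA
  rw [if_neg hh, if_neg (fun hcond : _ ∧ _ => by exact absurd hcond.1 (by simp)),
    if_neg (by simp : ¬ ((acc, false).2 = true)), if_pos hc]

theorem pvStepA_keep {l : List Char} (acc : List (List Char))
    (hh : ¬ PySem.Chars.isIn "subgraph SubProcesses".toList l = true)
    (hc : ¬ PySem.Chars.isIn "-.-> SubProcesses".toList l = true) :
    pvStepA (acc, false) l = (acc ++ [l], false) := by
  unfold pvStepA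
  rw [if_neg hh, if_neg (fun hcond : _ ∧ _ => by exact absurd hcond.1 (by simp)),
    if_neg (by simp : ¬ ((acc, false).2 = true)), if_neg hc]

theorem pvSkip_cons_end {l : List Char} (rest : List (List Char))
    (he : PySem.Chars.strip l = "end".toList) :
    pvSkipToEnd (l :: rest) = rest := by rw [pvSkipToEnd, if_pos he]

theorem pvSkip_cons {l : List Char} (rest : List (List Char))
    (he : ¬ PySem.Chars.strip l = "end".toList) :
    pvSkipToEnd (l :: rest) = pvSkipToEnd rest := by rw [pvSkipToEnd, if_neg he]

theorem pvBuild_hdr {l : List Char} (rest : List (List Char))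
    (hh : PySem.Chars.isIn "subgraph SubProcesses".toList l = true) :
    pvBuild (l :: rest) = pvBuild (pvSkipToEnd rest) := by rw [pvBuild, if_pos hh]

theorem pvBuild_conn {l : List Char} (rest : List (List Char))
    (hh : ¬ PySem.Chars.isIn "subgraph SubProcesses".toList l = true)
    (hc : PySem.Chars.isIn "-.-> SubProcesses".toList l = true) :
    pvBuild (l :: rest) = pvBuild rest := by rw [pvBuild, if_neg hh, if_pos hc]

theorem pvBuild_keep {l : List Char} (rest : List (List Char))
    (hh : ¬ PySem.Chars.isIn "subgraph SubProcesses".toList l = true)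
    (hc : ¬ PySem.Chars.isIn "-.-> SubProcesses".toList l = true) :
    pvBuild (l :: rest) = l :: pvBuild rest := by rw [pvBuild, if_neg hh, if_neg hc]

-- a non-whitespace character of cs survives strip
theorem pvMemStrip {c : Char} {cs : List Char} (hc : c ∈ cs)
    (hs : PySem.Chars.isspace c = false) : c ∈ PySem.Chars.strip cs := by
  unfold PySem.Chars.strip PySem.Chars.lstrip PySem.Chars.rstrip
  have h1 : c ∈ cs.dropWhile PySem.Chars.isspace := by
    rw [← List.takeWhile_append_dropWhile (p := PySem.Chars.isspace) (l := cs)] at hc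
    rcases List.mem_append.1 hc with h | h
    · have := List.mem_takeWhile_imp h
      simp [hs] at this
    · exact h
  have h2 : c ∈ (cs.dropWhile PySem.Chars.isspace).reverse := List.mem_reverse.2 h1
  rw [← List.takeWhile_append_dropWhile (p := PySem.Chars.isspace)
      (l := (cs.dropWhile PySem.Chars.isspace).reverse)] at h2
  rcases List.mem_append.1 h2 with h | h
  · have := List.mem_takeWhile_imp h
    simp [hs] at this
  · exact List.mem_reverse.2 h

-- a line whose strip() is "end" cannot contain the subgraph header
theorem pvStripEndNotHdr {l : List Char} (h : PySem.Chars.strip l = "end".toList) :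
    ¬ PySem.Chars.isIn "subgraph SubProcesses".toList l = true := by
  intro htrue
  have hinf := (PySem.Chars.isIn_iff_infix _ _).1 htrue
  have hu : 'u' ∈ l := hinf.subset (by decide)
  have hu' : 'u' ∈ PySem.Chars.strip l := pvMemStrip hu (by decide)
  rw [h] at hu'
  simp at hu'

-- the two loop modes of A, against B's two loops, simultaneously, by fuel induction
theorem pvModes : ∀ (n : Nat) (ls : List (List Char)), ls.length ≤ n →
    ∀ acc : List (List Char),
    (ls.foldl pvStepA (acc, false)).1 = acc ++ pvBuild ls ∧
    (ls.foldl pvStepA (acc, true)).1 = acc ++ pvBuild (pvSkipToEnd ls) := by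
  intro n
  induction n with
  | zero =>
    intro ls hls acc
    have : ls = [] := List.eq_nil_of_length_eq_zero (Nat.le_zero.1 hls)
    subst this
    simp [pvBuild, pvSkipToEnd]
  | succ n ih =>
    intro ls hls acc
    cases ls with
    | nil => simp [pvBuild, pvSkipToEnd]
    | cons l rest =>
      have hrest : rest.length ≤ n := Nat.succ_le_succ_iff.1 (by simpa using hls)
      have hskip : (pvSkipToEnd rest).length ≤ n :=
        le_trans (pvSkipToEnd_length_le rest) hrest
      constructor
      · -- mode false
        by_cases hh : PySem.Chars.isIn "subgraph SubProcesses".toList l = true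
        · rw [List.foldl_cons, pvStepA_hdr _ hh, pvBuild_hdr rest hh]
          exact (ih rest hrest acc).2
        · by_cases hc : PySem.Chars.isIn "-.-> SubProcesses".toList l = true
          · rw [List.foldl_cons, pvStepA_conn acc hh hc, pvBuild_conn rest hh hc]
            exact (ih rest hrest acc).1
          · rw [List.foldl_cons, pvStepA_keep acc hh hc, pvBuild_keep rest hh hc,
              (ih rest hrest (acc ++ [l])).1, List.append_assoc]
            rfl
      · -- mode true
        by_cases hh : PySem.Chars.isIn "subgraph SubProcesses".toList l = true
        · have hne : ¬ PySem.Chars.strip l = "end".toList :=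
            fun he => pvStripEndNotHdr he hh
          rw [List.foldl_cons, pvStepA_hdr _ hh, pvSkip_cons rest hne]
          exact (ih rest hrest acc).2
        · by_cases he : PySem.Chars.strip l = "end".toList
          · rw [List.foldl_cons, pvStepA_skip_end acc hh he, pvSkip_cons_end rest he]
            exact (ih rest hrest acc).1
          · rw [List.foldl_cons, pvStepA_skip acc hh he, pvSkip_cons rest he]
            exact (ih rest hrest acc).2

-- A's whole loop equals B's outer loop
theorem pvMain (ls : List (List Char)) : (ls.foldl pvStepA ([], false)).1 = pvBuild ls := by
  have h := (pvModes ls.length ls le_rfl []).1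
  simpa using h

-- ===== VERDICT (by name: the statement is the Claim_ definition above) =====
theorem fix_main_process_flow_py_spec : Claim_equal_fix_main_process_flow_py := by
  intro content _
  unfold Spec_fix_main_process_flow_py
  simp only [fix_main_process_flow_py, fix_main_process_flow_py_alt]
  rw [pvMain]
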